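-- pv_equiv track=rewrite | github.com/doshirush1901/ira-v3 | scripts/ask_ira.py | parse_sse_lines
-- ===== SOURCE A (Python) =====
-- def parse_sse_lines(buffer: str) -> tuple[list[tuple[str, str]], str]:
--     """Parse SSE buffer into events and return remaining buffer.
--
--     SSE uses ``\\r\\n`` line endings and ``\\r\\n\\r\\n`` as event delimiters.
--     """
--     normalized = buffer.replace("\r\n", "\n").replace("\r", "\n")
--
--     last_complete = normalized.rfind("\n\n")
--     if last_complete < 0:
--         return [], buffer
--
--     processable = normalized[:last_complete + 2]
--     remainder = normalized[last_complete + 2:]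
--
--     events: list[tuple[str, str]] = []
--     current_event = ""
--     current_data = ""
--
--     for line in processable.split("\n"):
--         line = line.strip()
--         if line.startswith("event:"):
--             current_event = line[6:].strip()
--         elif line.startswith("data:"):
--             current_data = line[5:].strip()
--         elif line.startswith(":"):
--             continue
--         elif line == "":
--             if current_data:
--                 events.append((current_event or "message", current_data))
--             current_event = ""
--             current_data = ""
--
--     return events, remainder
-- ===== SOURCE B (Python) =====
-- def parse_sse_lines(buffer: str) -> tuple[list[tuple[str, str]], str]:
--     """Parse SSE buffer into events and return remaining buffer.
--
--     Two-pass rewrite: group stripped lines into blocks at blank lines,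
--     then extract the last event:/data: field of each block.
--     """
--     normalized = buffer.replace("\r\n", "\n").replace("\r", "\n")
--
--     last_complete = normalized.rfind("\n\n")
--     if last_complete < 0:
--         return [], buffer
--
--     processable = normalized[:last_complete + 2]
--     remainder = normalized[last_complete + 2:]
--
--     # pass 1: group lines into blocks, a blank (after strip) line closes a block
--     blocks: list[list[str]] = []
--     current: list[str] = []
--     for line in processable.split("\n"):
--         line = line.strip()
--         if line == "":
--             blocks.append(current)
--             current = []
--         else:
--             current.append(line)
--     # lines after the final blank line belong to no complete block
--
--     # pass 2: per block, keep the last event: value and the last data: value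
--     events: list[tuple[str, str]] = []
--     for block in blocks:
--         event = ""
--         data = ""
--         for line in block:
--             if line.startswith("event:"):
--                 event = line[6:].strip()
--             elif line.startswith("data:"):
--                 data = line[5:].strip()
--         if data:
--             events.append((event or "message", data))
--     return events, remainder
-- ===== Notes on version B (the rewrite author's own statement) =====
-- stated objective: alternative
-- what changed: Replaces A's single stateful loop (carrying current_event/current_data and flushing on blank lines) with two passes: first group stripped lines into blank-line-delimited blocks, then extract each block's last event:/data: values and emit events.
import Mathlib
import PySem

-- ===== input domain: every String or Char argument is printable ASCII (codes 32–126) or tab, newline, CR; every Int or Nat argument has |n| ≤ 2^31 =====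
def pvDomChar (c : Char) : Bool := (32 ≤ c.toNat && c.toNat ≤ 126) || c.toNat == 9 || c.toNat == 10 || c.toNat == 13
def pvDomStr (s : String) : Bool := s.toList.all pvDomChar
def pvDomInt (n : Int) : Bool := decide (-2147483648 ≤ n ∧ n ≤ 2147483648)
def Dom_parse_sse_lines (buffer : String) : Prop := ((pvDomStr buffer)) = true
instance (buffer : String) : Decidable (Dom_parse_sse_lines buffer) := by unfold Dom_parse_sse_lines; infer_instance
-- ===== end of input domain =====

-- B replaces A's single stateful accumulation loop by two passes (group stripped
-- lines into blank-line-delimited blocks, then extract each block's last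
-- event:/data: fields); objective: alternative decomposition, same cost.

-- ===== PORT A =====
-- one step of A's for-loop over the split lines; state = (events, current_event, current_data)
def pvStepA (st : (List (String × String)) × String × String) (l : String) :
    (List (String × String)) × String × String :=
  let line := PySem.Str.strip l
  if PySem.Str.startswith line "event:" then
    (st.1, PySem.Str.strip (PySem.Str.slice line (some 6) none), st.2.2)
  else if PySem.Str.startswith line "data:" then
    (st.1, st.2.1, PySem.Str.strip (PySem.Str.slice line (some 5) none))
  else if PySem.Str.startswith line ":" then
    st
  else if line = "" then
    ((if st.2.2 ≠ "" then st.1 ++ [((if st.2.1 = "" then "message" else st.2.1), st.2.2)] else st.1),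
      "", "")
  else st

def parse_sse_lines (buffer : String) : (List (String × String)) × String :=
  let normalized := PySem.Str.replace (PySem.Str.replace buffer "\r\n" "\n") "\r" "\n"
  let last_complete := PySem.Str.rfind normalized "\n\n"
  if last_complete < 0 then ([], buffer)
  else
    let processable := PySem.Str.slice normalized none (some (last_complete + 2))
    let remainder := PySem.Str.slice normalized (some (last_complete + 2)) none
    -- split? is `some` here since the separator "\n" is nonempty
    let st := ((PySem.Str.split? processable "\n").getD []).foldl pvStepA ([], "", "")
    (st.1, remainder)

-- ===== PORT B =====
-- pass 1 step: strip the line; a blank line closes the current block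
def pvGroupStep (st : List (List String) × List String) (l : String) :
    List (List String) × List String :=
  let line := PySem.Str.strip l
  if line = "" then (st.1 ++ [st.2], []) else (st.1, st.2 ++ [line])

-- pass 2 inner step: keep the last event:/data: values seen in the block
def pvScanStep (st : String × String) (l : String) : String × String :=
  if PySem.Str.startswith l "event:" then
    (PySem.Str.strip (PySem.Str.slice l (some 6) none), st.2)
  else if PySem.Str.startswith l "data:" then
    (st.1, PySem.Str.strip (PySem.Str.slice l (some 5) none))
  else st

-- pass 2 per block: emit one event when the block has non-empty data
def pvFlushBlock (b : List String) : List (String × String) :=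
  let s := b.foldl pvScanStep ("", "")
  if s.2 ≠ "" then [((if s.1 = "" then "message" else s.1), s.2)] else []

def parse_sse_lines_alt (buffer : String) : (List (String × String)) × String :=
  let normalized := PySem.Str.replace (PySem.Str.replace buffer "\r\n" "\n") "\r" "\n"
  let last_complete := PySem.Str.rfind normalized "\n\n"
  if last_complete < 0 then ([], buffer)
  else
    let processable := PySem.Str.slice normalized none (some (last_complete + 2))
    let remainder := PySem.Str.slice normalized (some (last_complete + 2)) none
    let gb := ((PySem.Str.split? processable "\n").getD []).foldl pvGroupStep ([], [])
    let events := gb.1.foldl (fun acc b => acc ++ pvFlushBlock b) []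
    (events, remainder)

-- ===== PRECONDITION & SPEC =====
def Spec_parse_sse_lines (buffer : String) (out : (List (String × String)) × String) : Prop := out = parse_sse_lines_alt buffer
instance (buffer : String) (out : (List (String × String)) × String) : Decidable (Spec_parse_sse_lines buffer out) := by unfold Spec_parse_sse_lines; infer_instance

-- ===== CLAIM (what is proved, stated in full; the proofs are below) =====
def Claim_equal_parse_sse_lines : Prop := ∀ (buffer : String), Dom_parse_sse_lines buffer → Spec_parse_sse_lines buffer (parse_sse_lines buffer)

-- ===== LEMMAS AND PROOFS =====

-- common semantics of the event-extraction over a list of ALREADY-STRIPPED lines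
def pvE : List String → String → String → List (String × String)
  | [], _, _ => []
  | l :: ls, ev, data =>
    if PySem.Str.startswith l "event:" then
      pvE ls (PySem.Str.strip (PySem.Str.slice l (some 6) none)) data
    else if PySem.Str.startswith l "data:" then
      pvE ls ev (PySem.Str.strip (PySem.Str.slice l (some 5) none))
    else if PySem.Str.startswith l ":" then pvE ls ev data
    else if l = "" then
      (if data ≠ "" then [((if ev = "" then "message" else ev), data)] else []) ++ pvE ls "" ""
    else pvE ls ev data

theorem pvA_loop (ls : List String) : ∀ (acc : List (String × String)) (ev data : String),
    (ls.foldl pvStepA (acc, ev, data)).1 = acc ++ pvE (ls.map PySem.Str.strip) ev data := by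
  induction ls with
  | nil => intro acc ev data; simp [pvE]
  | cons l ls ih =>
    intro acc ev data
    simp only [List.foldl_cons, List.map_cons, pvStepA, pvE]
    split_ifs with h1 h2 h3 h4 <;> simp [ih]

theorem pvB_loop (ls : List String) : ∀ (bs : List (List String)) (cur : List String),
    ((ls.foldl pvGroupStep (bs, cur)).1).flatMap pvFlushBlock
      = bs.flatMap pvFlushBlock
        ++ pvE (ls.map PySem.Str.strip) (cur.foldl pvScanStep ("", "")).1
            (cur.foldl pvScanStep ("", "")).2 := by
  induction ls with
  | nil => intro bs cur; simp [pvE]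
  | cons l ls ih =>
    intro bs cur
    simp only [List.foldl_cons, List.map_cons, pvGroupStep]
    by_cases h : PySem.Str.strip l = ""
    · rw [if_pos h]
      rw [ih]
      rw [h]
      have e1 : PySem.Chars.startswith ([] : List Char) ['e','v','e','n','t',':'] = false := by decide
      have e2 : PySem.Chars.startswith ([] : List Char) ['d','a','t','a',':'] = false := by decide
      have e3 : PySem.Chars.startswith ([] : List Char) [':'] = false := by decide
      simp [pvE, e1, e2, e3, pvFlushBlock]
    · rw [if_neg h]
      rw [ih]
      simp only [List.foldl_append, List.foldl_cons, List.foldl_nil]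
      rw [show pvE (PySem.Str.strip l :: ls.map PySem.Str.strip)
            (cur.foldl pvScanStep ("", "")).1 (cur.foldl pvScanStep ("", "")).2
          = pvE (ls.map PySem.Str.strip)
              (pvScanStep (cur.foldl pvScanStep ("", "")) (PySem.Str.strip l)).1
              (pvScanStep (cur.foldl pvScanStep ("", "")) (PySem.Str.strip l)).2 from ?_]
      simp only [pvE, pvScanStep]
      split_ifs with h1 h2 <;> simp

-- ===== VERDICT (by name: the statement is the Claim_ definition above) =====
theorem parse_sse_lines_spec : Claim_equal_parse_sse_lines := by
  intro buffer _
  unfold Spec_parse_sse_lines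
  simp only [parse_sse_lines, parse_sse_lines_alt]
  split
  · rfl
  · refine Prod.ext ?_ rfl
    simp only
    rw [PySem.List.foldl_append_eq_flatMap, List.nil_append]
    rw [pvA_loop, pvB_loop]
    simp
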